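-- pv_equiv track=rewrite | github.com/paulhondola/Logica-si-Structuri-Discrete | lab/lab4.py | cifre_cond
-- ===== SOURCE A (Python) =====
-- def cifre_cond(nr): #cifre pare
--     if nr <= 9:
--         if nr % 2 == 0:
--             return [nr]
--         else:
--             return []
--
--     else:
--         if nr % 2 == 0 :
--             return cifre_cond(nr//10) + [nr%10]
--         else:
--             return cifre_cond(nr//10)
-- ===== SOURCE B (Python) =====
-- def cifre_cond(nr):
--     result = []
--     while nr > 9:
--         if nr % 2 == 0:
--             result.append(nr % 10)
--         nr //= 10
--     if nr % 2 == 0: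
--         result.append(nr)
--     return result[::-1]
-- ===== Notes on version B (the rewrite author's own statement) =====
-- stated objective: alternative
-- what changed: Replaced the recursion with an iterative while-loop that collects even digits least-significant-first into an accumulator and reverses it at the end.
import Mathlib
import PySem

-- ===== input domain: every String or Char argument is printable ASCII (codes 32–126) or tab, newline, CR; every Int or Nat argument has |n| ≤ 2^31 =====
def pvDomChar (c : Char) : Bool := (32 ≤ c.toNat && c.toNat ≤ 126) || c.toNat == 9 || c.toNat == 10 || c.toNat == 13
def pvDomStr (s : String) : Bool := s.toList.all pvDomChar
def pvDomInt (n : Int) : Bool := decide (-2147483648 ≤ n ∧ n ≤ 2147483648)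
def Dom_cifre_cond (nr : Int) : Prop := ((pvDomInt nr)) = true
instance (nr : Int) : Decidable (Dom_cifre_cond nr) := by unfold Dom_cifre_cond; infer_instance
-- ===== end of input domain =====

-- B replaces A's recursion by an iterative loop collecting even digits least-significant-first
-- and reversing at the end; same cost, different decomposition (objective: alternative).

-- termination measure fact, cited by both ports
theorem pvFloordiv10_lt (nr : Int) (h : ¬ nr ≤ 9) :
    (PySem.Int.floordiv nr 10).toNat < nr.toNat := by
  rw [PySem.Int.floordiv_eq_ediv_of_pos (by norm_num)]
  omega

-- ===== PORT A =====
def cifre_cond (nr : Int) : List Int :=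
  if nr ≤ 9 then
    if PySem.Int.mod nr 2 = 0 then [nr] else []
  else
    if PySem.Int.mod nr 2 = 0 then
      cifre_cond (PySem.Int.floordiv nr 10) ++ [PySem.Int.mod nr 10]
    else
      cifre_cond (PySem.Int.floordiv nr 10)
termination_by nr.toNat
decreasing_by all_goals exact pvFloordiv10_lt nr (by assumption)

-- ===== PORT B =====
-- the while-loop of Source B, state = (nr, result); the final if is the code after the loop
def cifre_cond_altLoop (nr : Int) (result : List Int) : List Int :=
  if nr > 9 then
    cifre_cond_altLoop (PySem.Int.floordiv nr 10)
      (if PySem.Int.mod nr 2 = 0 then result ++ [PySem.Int.mod nr 10] else result)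
  else
    if PySem.Int.mod nr 2 = 0 then result ++ [nr] else result
termination_by nr.toNat
decreasing_by exact pvFloordiv10_lt nr (by omega)

def cifre_cond_alt (nr : Int) : List Int :=
  (cifre_cond_altLoop nr []).reverse   -- result[::-1]

-- ===== PRECONDITION & SPEC =====
def Spec_cifre_cond (nr : Int) (out : List Int) : Prop := out = cifre_cond_alt nr
instance (nr : Int) (out : List Int) : Decidable (Spec_cifre_cond nr out) := by unfold Spec_cifre_cond; infer_instance

-- ===== CLAIM (what is proved, stated in full; the proofs are below) =====
def Claim_equal_cifre_cond : Prop := ∀ (nr : Int), Dom_cifre_cond nr → Spec_cifre_cond nr (cifre_cond nr)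

-- ===== LEMMAS AND PROOFS =====
theorem cifre_cond_altLoop_eq (n : Nat) : ∀ (nr : Int), nr.toNat = n →
    ∀ acc, cifre_cond_altLoop nr acc = acc ++ (cifre_cond nr).reverse := by
  induction n using Nat.strong_induction_on with
  | _ n ih =>
    intro nr hn acc
    rw [cifre_cond_altLoop, cifre_cond]
    by_cases h9 : nr ≤ 9
    · simp only [show ¬ nr > 9 by omega, if_false]
      split_ifs <;> simp
    · simp only [show nr > 9 by omega, if_true, if_neg h9]
      rw [ih (PySem.Int.floordiv nr 10).toNat (hn ▸ pvFloordiv10_lt nr h9) _ rfl]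
      split_ifs <;> simp

-- ===== VERDICT (by name: the statement is the Claim_ definition above) =====
theorem cifre_cond_spec : Claim_equal_cifre_cond := by
  intro nr _
  unfold Spec_cifre_cond cifre_cond_alt
  rw [cifre_cond_altLoop_eq nr.toNat nr rfl []]
  simp
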